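-- pv_equiv track=rewrite | github.com/MaximSinyaev/checkio | etc/seven-segment.py | seven_segment
-- ===== SOURCE A (Python) =====
-- nums = {
--     1: {'b', 'c'},
--     2: set(i for i in 'abged'),
--     3: set(i for i in 'abgcd'),
--     4: set(i for i in 'fgbc'),
--     5: set(i for i in 'afgcd'),
--     6: set(i for i in 'afgcde'),
--     7: set(i for i in 'abc'),
--     8: set(i for i in 'abcdefg'),
--     9: set(i for i in 'abcdfg'),
--     0: set(i for i in 'abcdef')
-- }
--
-- def combinations(broken, subs, dig, dig_vars):
--     for i in broken:
--         subs.add(i)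
--         combinations(broken - set(i), subs, dig, dig_vars)
--         for i, sub in nums.items():
--             if (broken | dig) == sub:
--                 dig_vars.add(i)
--
-- def seven_segment(lit_seg, broken_seg):
--     first_dig = set()
--     first_dig_br = set()
--     first_dig_vars = set()
--     second_dig = set()
--     second_dig_br = set()
--     second_dig_vars = set()
--     for segment in lit_seg:
--         if segment.isupper():
--             first_dig.add(segment.lower())
--         else:
--             second_dig.add(segment)
--     for i, seq in nums.items():
--         if seq == first_dig:
--             first_dig_vars.add(i)
--         if seq == second_dig:
--             second_dig_vars.add(i)
--     for i in broken_seg: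
--         if i.isupper():
--             first_dig_br.add(i.lower())
--         else:
--             second_dig_br.add(i)
--     combinations(first_dig_br, set(), first_dig, first_dig_vars)
--     combinations(second_dig_br, set(), second_dig, second_dig_vars)
--     l1 = len(first_dig_vars)
--     l2 = len(second_dig_vars)
--     # sum = l2 if (0 in first_dig_vars) else 0
--     sum = 0
--     sum += l1 * l2
--     return sum
-- ===== SOURCE B (Python) =====
-- # Direct containment count: digit d is reachable iff lit ⊆ nums[d] ⊆ lit ∪ broken;
-- # count each position independently and multiply (no subset recursion).
-- _NUMS = {
--     1: 'bc', 2: 'abged', 3: 'abgcd', 4: 'fgbc', 5: 'afgcd',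
--     6: 'afgcde', 7: 'abc', 8: 'abcdefg', 9: 'abcdfg', 0: 'abcdef',
-- }
--
-- def _count(lit, broken):
--     return sum(1 for pat in _NUMS.values()
--                if lit <= set(pat) <= lit | broken)
--
-- def seven_segment(lit_seg, broken_seg):
--     first_lit = {c.lower() for c in lit_seg if c.isupper()}
--     second_lit = {c for c in lit_seg if not c.isupper()}
--     first_broken = {c.lower() for c in broken_seg if c.isupper()}
--     second_broken = {c for c in broken_seg if not c.isupper()}
--     return _count(first_lit, first_broken) * _count(second_lit, second_broken)
-- ===== Notes on version B (the rewrite author's own statement) =====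
-- stated objective: simpler
-- what changed: Replaces the recursive enumeration of broken-segment subsets with a direct containment test (lit ⊆ nums[d] ⊆ lit ∪ broken) over the 10 fixed digit patterns, multiplying the two per-digit counts.
import Mathlib
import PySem

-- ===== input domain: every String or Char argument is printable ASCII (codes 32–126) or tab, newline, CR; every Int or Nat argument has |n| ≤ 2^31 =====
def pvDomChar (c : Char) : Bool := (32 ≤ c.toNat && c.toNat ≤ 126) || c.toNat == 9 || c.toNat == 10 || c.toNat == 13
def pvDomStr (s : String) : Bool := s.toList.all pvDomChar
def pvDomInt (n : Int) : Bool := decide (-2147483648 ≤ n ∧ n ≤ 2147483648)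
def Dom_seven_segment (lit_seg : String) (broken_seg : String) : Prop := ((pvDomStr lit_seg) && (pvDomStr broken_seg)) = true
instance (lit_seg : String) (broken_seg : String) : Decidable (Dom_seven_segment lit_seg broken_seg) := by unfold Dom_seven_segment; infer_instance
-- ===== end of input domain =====

-- B replaces A's recursive subset enumeration by a direct containment count over the
-- 10 digit patterns (objective: simpler; same return value).

-- ===== PORT A =====
-- the module-level table `nums` (digit -> set of lit segments), in dict insertion order
def pvNUMS : List (Int × List Char) :=
  [(1, ['b', 'c']),
   (2, ['a', 'b', 'g', 'e', 'd']),
   (3, ['a', 'b', 'g', 'c', 'd']),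
   (4, ['f', 'g', 'b', 'c']),
   (5, ['a', 'f', 'g', 'c', 'd']),
   (6, ['a', 'f', 'g', 'c', 'd', 'e']),
   (7, ['a', 'b', 'c']),
   (8, ['a', 'b', 'c', 'd', 'e', 'f', 'g']),
   (9, ['a', 'b', 'c', 'd', 'f', 'g']),
   (0, ['a', 'b', 'c', 'd', 'e', 'f'])]

def pvNums : List (Int × PySem.Set Char) :=
  pvNUMS.map (fun p => (p.1, PySem.Set.ofList p.2))

-- the inner `for i, sub in nums.items(): if (broken | dig) == sub: dig_vars.add(i)` loop
def pvInner (broken dig : PySem.Set Char) (st : PySem.Set Char × PySem.Set Int) :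
    PySem.Set Char × PySem.Set Int :=
  pvNums.foldl
    (fun st2 p =>
      if PySem.Set.equal (PySem.Set.union broken dig) p.2 then (st2.1, PySem.Set.add st2.2 p.1)
      else st2)
    st

-- `combinations(broken, subs, dig, dig_vars)`, state (subs, dig_vars) threaded explicitly;
-- the Nat fuel only guards totality: every call removes one element of `broken`, so
-- fuel = broken.length never runs out (the fuel-0 loop body is over an empty `broken`).
def pvCombinations : Nat → PySem.Set Char → PySem.Set Char → PySem.Set Char → PySem.Set Int →
    PySem.Set Char × PySem.Set Int
  | 0, broken, subs, dig, dig_vars =>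
      broken.foldl
        (fun st i => pvInner broken dig (PySem.Set.add st.1 i, st.2))
        (subs, dig_vars)
  | fuel + 1, broken, subs, dig, dig_vars =>
      broken.foldl
        (fun st i =>
          pvInner broken dig
            (pvCombinations fuel (PySem.Set.diff broken (PySem.Set.ofList [i]))
              (PySem.Set.add st.1 i) dig st.2))
        (subs, dig_vars)

def seven_segment (lit_seg : String) (broken_seg : String) : Int :=
  let digs := lit_seg.toList.foldl
    (fun (st : PySem.Set Char × PySem.Set Char) segment =>
      if PySem.Chars.isupper segment then (PySem.Set.add st.1 (PySem.Chars.lowerChar segment), st.2)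
      else (st.1, PySem.Set.add st.2 segment))
    (PySem.Set.empty, PySem.Set.empty)
  let vars0 := pvNums.foldl
    (fun (st : PySem.Set Int × PySem.Set Int) p =>
      let st1 := if PySem.Set.equal p.2 digs.1 then PySem.Set.add st.1 p.1 else st.1
      let st2 := if PySem.Set.equal p.2 digs.2 then PySem.Set.add st.2 p.1 else st.2
      (st1, st2))
    (PySem.Set.empty, PySem.Set.empty)
  let brs := broken_seg.toList.foldl
    (fun (st : PySem.Set Char × PySem.Set Char) i =>
      if PySem.Chars.isupper i then (PySem.Set.add st.1 (PySem.Chars.lowerChar i), st.2)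
      else (st.1, PySem.Set.add st.2 i))
    (PySem.Set.empty, PySem.Set.empty)
  let first_dig_vars := (pvCombinations brs.1.length brs.1 PySem.Set.empty digs.1 vars0.1).2
  let second_dig_vars := (pvCombinations brs.2.length brs.2 PySem.Set.empty digs.2 vars0.2).2
  PySem.Set.len first_dig_vars * PySem.Set.len second_dig_vars

-- ===== PORT B =====
-- `sum(1 for pat in _NUMS.values() if lit <= set(pat) <= lit | broken)`
def pvCount (lit broken : PySem.Set Char) : Int :=
  ((pvNUMS.map (·.2)).countP
    (fun pat =>
      PySem.Set.issubset lit (PySem.Set.ofList pat) &&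
      PySem.Set.issubset (PySem.Set.ofList pat) (PySem.Set.union lit broken)) : Nat)

def seven_segment_alt (lit_seg : String) (broken_seg : String) : Int :=
  let first_lit := PySem.Set.ofList
    ((lit_seg.toList.filter (fun c => PySem.Chars.isupper c)).map PySem.Chars.lowerChar)
  let second_lit := PySem.Set.ofList (lit_seg.toList.filter (fun c => !PySem.Chars.isupper c))
  let first_broken := PySem.Set.ofList
    ((broken_seg.toList.filter (fun c => PySem.Chars.isupper c)).map PySem.Chars.lowerChar)
  let second_broken := PySem.Set.ofList (broken_seg.toList.filter (fun c => !PySem.Chars.isupper c))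
  pvCount first_lit first_broken * pvCount second_lit second_broken

-- ===== PRECONDITION & SPEC =====
def Spec_seven_segment (lit_seg : String) (broken_seg : String) (out : Int) : Prop := out = seven_segment_alt lit_seg broken_seg
instance (lit_seg : String) (broken_seg : String) (out : Int) : Decidable (Spec_seven_segment lit_seg broken_seg out) := by unfold Spec_seven_segment; infer_instance

-- ===== CLAIM (what is proved, stated in full; the proofs are below) =====
def Claim_equal_seven_segment : Prop := ∀ (lit_seg : String) (broken_seg : String), Dom_seven_segment lit_seg broken_seg → Spec_seven_segment lit_seg broken_seg (seven_segment lit_seg broken_seg)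

-- ===== LEMMAS AND PROOFS =====

-- the digits `combinations` adds for a given (broken, dig): pattern = dig ∪ S for some
-- nonempty S ⊆ broken
def pvE (broken dig pat : List Char) : Prop :=
  (∀ c ∈ dig, c ∈ pat) ∧ (∀ c ∈ pat, c ∈ dig ∨ c ∈ broken) ∧
    ((∃ c ∈ pat, c ∉ dig) ∨ ∃ c ∈ broken, c ∈ dig)

-- the combined reachability condition both programs count
def pvBetween (dig broken pat : List Char) : Prop :=
  (∀ c ∈ dig, c ∈ pat) ∧ ∀ c ∈ pat, c ∈ dig ∨ c ∈ broken

theorem pvE_nil (dig pat : List Char) : ¬ pvE [] dig pat := by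
  rintro ⟨h1, h2, h3 | h3⟩
  · obtain ⟨c, hc, hcd⟩ := h3
    rcases h2 c hc with h | h
    · exact hcd h
    · simp at h
  · obtain ⟨c, hc, _⟩ := h3
    simp at hc

theorem pvE_union (broken dig pat : List Char) :
    (∃ i ∈ broken, pvE (PySem.Set.diff broken (PySem.Set.ofList [i])) dig pat ∨
        PySem.Set.equal (PySem.Set.union broken dig) pat = true) ↔
      pvE broken dig pat := by
  constructor
  · rintro ⟨i, hi, h | h⟩
    · obtain ⟨h1, h2, h3⟩ := h
      refine ⟨h1, ?_, ?_⟩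
      · intro c hc
        rcases h2 c hc with h | h
        · exact Or.inl h
        · rw [PySem.Set.mem_diff] at h
          exact Or.inr h.1
      · rcases h3 with ⟨c, hc, hcd⟩ | ⟨c, hc, hcd⟩
        · exact Or.inl ⟨c, hc, hcd⟩
        · rw [PySem.Set.mem_diff] at hc
          exact Or.inr ⟨c, hc.1, hcd⟩
    · rw [PySem.Set.equal_iff] at h
      refine ⟨?_, ?_, ?_⟩
      · intro c hc
        exact (h c).1 (by simp [PySem.Set.mem_union, hc])
      · intro c hc
        have := (h c).2 hc
        rw [PySem.Set.mem_union] at this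
        tauto
      · have hip : i ∈ pat := (h i).1 (by simp [PySem.Set.mem_union, hi])
        by_cases hid : i ∈ dig
        · exact Or.inr ⟨i, hi, hid⟩
        · exact Or.inl ⟨i, hip, hid⟩
  · rintro ⟨h1, h2, h3⟩
    have hne : ∃ i, i ∈ broken := by
      rcases h3 with ⟨c, hc, hcd⟩ | ⟨c, hc, _⟩
      · rcases h2 c hc with h | h
        · exact absurd h hcd
        · exact ⟨c, h⟩
      · exact ⟨c, hc⟩
    by_cases hall : ∀ c ∈ broken, c ∈ pat
    · obtain ⟨i, hi⟩ := hne
      refine ⟨i, hi, Or.inr ?_⟩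
      rw [PySem.Set.equal_iff]
      intro c
      rw [PySem.Set.mem_union]
      constructor
      · rintro (h | h)
        · exact hall c h
        · exact h1 c h
      · intro h
        exact (h2 c h).symm.imp (fun h' => h') (fun h' => h')
    · push Not at hall
      obtain ⟨i, hi, hip⟩ := hall
      refine ⟨i, hi, Or.inl ⟨h1, ?_, ?_⟩⟩
      · intro c hc
        rcases h2 c hc with h | h
        · exact Or.inl h
        · refine Or.inr ?_
          rw [PySem.Set.mem_diff]
          refine ⟨h, ?_⟩
          simp only [PySem.Set.mem_ofList, List.mem_singleton]
          rintro rfl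
          exact hip hc
      · rcases h3 with ⟨c, hc, hcd⟩ | ⟨c, hc, hcd⟩
        · exact Or.inl ⟨c, hc, hcd⟩
        · refine Or.inr ⟨c, ?_, hcd⟩
          rw [PySem.Set.mem_diff]
          refine ⟨hc, ?_⟩
          simp only [PySem.Set.mem_ofList, List.mem_singleton]
          rintro rfl
          exact hip (h1 c hcd)

-- pvInner: the dig_vars component gains the digits whose pattern equals broken ∪ dig
theorem pvInner_mem (broken dig : PySem.Set Char) (st : PySem.Set Char × PySem.Set Int)
    (x : Int) :
    x ∈ (pvInner broken dig st).2 ↔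
      x ∈ st.2 ∨ ∃ p ∈ pvNums, p.1 = x ∧
        PySem.Set.equal (PySem.Set.union broken dig) p.2 = true := by
  unfold pvInner
  generalize pvNums = l
  induction l generalizing st with
  | nil => simp
  | cons p l ih =>
    simp only [List.foldl_cons, List.mem_cons]
    split_ifs with h
    · rw [ih]
      simp only [PySem.Set.mem_add]
      constructor
      · rintro ((hx | rfl) | ⟨q, hq, h1, h2⟩)
        · exact Or.inl hx
        · exact Or.inr ⟨p, Or.inl rfl, rfl, h⟩
        · exact Or.inr ⟨q, Or.inr hq, h1, h2⟩
      · rintro (hx | ⟨q, hq | hq, h1, h2⟩)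
        · exact Or.inl (Or.inl hx)
        · subst hq; exact Or.inl (Or.inr h1.symm)
        · exact Or.inr ⟨q, hq, h1, h2⟩
    · rw [ih]
      constructor
      · rintro (hx | ⟨q, hq, h1, h2⟩)
        · exact Or.inl hx
        · exact Or.inr ⟨q, Or.inr hq, h1, h2⟩
      · rintro (hx | ⟨q, hq | hq, h1, h2⟩)
        · exact Or.inl hx
        · subst hq; exact absurd h2 (by simp [h])
        · exact Or.inr ⟨q, hq, h1, h2⟩

theorem pvInner_nodup (broken dig : PySem.Set Char) (st : PySem.Set Char × PySem.Set Int)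
    (h : st.2.Nodup) : (pvInner broken dig st).2.Nodup := by
  unfold pvInner
  generalize pvNums = l
  induction l generalizing st with
  | nil => exact h
  | cons p l ih =>
    simp only [List.foldl_cons]
    split_ifs
    · exact ih _ (PySem.Set.nodup_add _ _ h)
    · exact ih _ h

-- `combinations` : membership characterization of the dig_vars component
theorem pvCombinations_mem :
    ∀ (fuel : Nat) (broken : PySem.Set Char), broken.Nodup → broken.length ≤ fuel →
    ∀ (dig subs : PySem.Set Char) (dv : PySem.Set Int) (x : Int),
      (x ∈ (pvCombinations fuel broken subs dig dv).2 ↔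
        x ∈ dv ∨ ∃ p ∈ pvNums, p.1 = x ∧ pvE broken dig p.2) := by
  intro fuel
  induction fuel with
  | zero =>
    intro broken hnd hlen dig subs dv x
    have hb : broken = [] := List.length_eq_zero_iff.mp (Nat.le_zero.mp hlen)
    subst hb
    simp only [pvCombinations, List.foldl_nil]
    constructor
    · exact Or.inl
    · rintro (h | ⟨p, _, _, hE⟩)
      · exact h
      · exact absurd hE (pvE_nil _ _)
  | succ fuel ih =>
    intro broken hnd hlen dig subs dv x
    simp only [pvCombinations]
    -- characterize the fold over a sublist l of broken
    suffices h : ∀ (l : List Char), (∀ i ∈ l, i ∈ broken) →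
        ∀ (st : PySem.Set Char × PySem.Set Int),
        (x ∈ (l.foldl
            (fun st i =>
              pvInner broken dig
                (pvCombinations fuel (PySem.Set.diff broken (PySem.Set.ofList [i]))
                  (PySem.Set.add st.1 i) dig st.2)) st).2 ↔
          x ∈ st.2 ∨ ∃ i ∈ l,
            ((∃ p ∈ pvNums, p.1 = x ∧ pvE (PySem.Set.diff broken (PySem.Set.ofList [i])) dig p.2) ∨
              ∃ p ∈ pvNums, p.1 = x ∧
                PySem.Set.equal (PySem.Set.union broken dig) p.2 = true)) by
      rw [h broken (fun _ h => h) (subs, dv)]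
      constructor
      · rintro (hx | ⟨i, hi, ⟨p, hp, h1, h2⟩ | ⟨p, hp, h1, h2⟩⟩)
        · exact Or.inl hx
        · exact Or.inr ⟨p, hp, h1, (pvE_union broken dig p.2).1 ⟨i, hi, Or.inl h2⟩⟩
        · exact Or.inr ⟨p, hp, h1, (pvE_union broken dig p.2).1 ⟨i, hi, Or.inr h2⟩⟩
      · rintro (hx | ⟨p, hp, h1, h2⟩)
        · exact Or.inl hx
        · obtain ⟨i, hi, h⟩ := (pvE_union broken dig p.2).2 h2
          refine Or.inr ⟨i, hi, ?_⟩
          rcases h with h | h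
          · exact Or.inl ⟨p, hp, h1, h⟩
          · exact Or.inr ⟨p, hp, h1, h⟩
    intro l hl
    induction l with
    | nil => simp
    | cons i l ihl =>
      intro st
      have hib : i ∈ broken := hl i (List.mem_cons_self ..)
      have hlen' : (PySem.Set.diff broken (PySem.Set.ofList [i])).length ≤ fuel := by
        have : (PySem.Set.diff broken (PySem.Set.ofList [i])).length < broken.length := by
          apply List.length_filter_lt_length_iff_exists.mpr
          exact ⟨i, hib, by simp [PySem.Set.contains]⟩
        omega
      have hnd' : (PySem.Set.diff broken (PySem.Set.ofList [i])).Nodup :=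
        PySem.Set.nodup_diff _ _ hnd
      simp only [List.foldl_cons]
      rw [ihl (fun j hj => hl j (List.mem_cons_of_mem _ hj))]
      rw [pvInner_mem]
      rw [ih _ hnd' hlen']
      simp only [List.mem_cons]
      constructor
      · rintro (((hx | h) | h) | ⟨j, hj, hC⟩)
        · exact Or.inl hx
        · exact Or.inr ⟨i, Or.inl rfl, Or.inl h⟩
        · exact Or.inr ⟨i, Or.inl rfl, Or.inr h⟩
        · exact Or.inr ⟨j, Or.inr hj, hC⟩
      · rintro (hx | ⟨j, hj | hj, hC⟩)
        · exact Or.inl (Or.inl (Or.inl hx))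
        · subst hj
          rcases hC with h | h
          · exact Or.inl (Or.inl (Or.inr h))
          · exact Or.inl (Or.inr h)
        · exact Or.inr ⟨j, hj, hC⟩

theorem pvCombinations_nodup :
    ∀ (fuel : Nat) (broken dig subs : PySem.Set Char) (dv : PySem.Set Int),
      dv.Nodup → (pvCombinations fuel broken subs dig dv).2.Nodup := by
  intro fuel
  induction fuel with
  | zero =>
    intro broken dig subs dv hdv
    simp only [pvCombinations]
    suffices h : ∀ (l : List Char) (st : PySem.Set Char × PySem.Set Int), st.2.Nodup →
        (l.foldl (fun st i => pvInner broken dig (PySem.Set.add st.1 i, st.2)) st).2.Nodup by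
      exact h broken (subs, dv) hdv
    intro l
    induction l with
    | nil => exact fun st h => h
    | cons i l ihl => exact fun st h => ihl _ (pvInner_nodup _ _ _ h)
  | succ fuel ih =>
    intro broken dig subs dv hdv
    simp only [pvCombinations]
    suffices h : ∀ (l : List Char) (st : PySem.Set Char × PySem.Set Int), st.2.Nodup →
        (l.foldl
          (fun st i =>
            pvInner broken dig
              (pvCombinations fuel (PySem.Set.diff broken (PySem.Set.ofList [i]))
                (PySem.Set.add st.1 i) dig st.2)) st).2.Nodup by
      exact h broken (subs, dv) hdv
    intro l
    induction l with
    | nil => exact fun st h => h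
    | cons i l ihl =>
      intro st h
      exact ihl _ (pvInner_nodup _ _ _ (ih _ _ _ _ h))

-- the string-splitting folds: membership and Nodup
theorem pvSplit_mem (s : List Char) (st : PySem.Set Char × PySem.Set Char) (x : Char) :
    (x ∈ (s.foldl
        (fun (st : PySem.Set Char × PySem.Set Char) c =>
          if PySem.Chars.isupper c then (PySem.Set.add st.1 (PySem.Chars.lowerChar c), st.2)
          else (st.1, PySem.Set.add st.2 c)) st).1 ↔
      x ∈ st.1 ∨ ∃ c ∈ s, PySem.Chars.isupper c = true ∧ x = PySem.Chars.lowerChar c) ∧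
    (x ∈ (s.foldl
        (fun (st : PySem.Set Char × PySem.Set Char) c =>
          if PySem.Chars.isupper c then (PySem.Set.add st.1 (PySem.Chars.lowerChar c), st.2)
          else (st.1, PySem.Set.add st.2 c)) st).2 ↔
      x ∈ st.2 ∨ ∃ c ∈ s, PySem.Chars.isupper c = false ∧ x = c) := by
  induction s generalizing st with
  | nil => simp
  | cons c s ihs =>
    simp only [List.foldl_cons, List.mem_cons]
    constructor
    · by_cases hc : PySem.Chars.isupper c
      · rw [if_pos hc, (ihs _).1]
        simp only [PySem.Set.mem_add]
        constructor
        · rintro (⟨hx | rfl⟩ | ⟨d, hd, h1, h2⟩)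
          · exact Or.inl hx
          · exact Or.inr ⟨c, Or.inl rfl, hc, rfl⟩
          · exact Or.inr ⟨d, Or.inr hd, h1, h2⟩
        · rintro (hx | ⟨d, rfl | hd, h1, h2⟩)
          · exact Or.inl (Or.inl hx)
          · exact Or.inl (Or.inr h2)
          · exact Or.inr ⟨d, hd, h1, h2⟩
      · rw [if_neg hc, (ihs _).1]
        constructor
        · rintro (hx | ⟨d, hd, h1, h2⟩)
          · exact Or.inl hx
          · exact Or.inr ⟨d, Or.inr hd, h1, h2⟩
        · rintro (hx | ⟨d, rfl | hd, h1, h2⟩)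
          · exact Or.inl hx
          · exact absurd h1 (by simpa using hc)
          · exact Or.inr ⟨d, hd, h1, h2⟩
    · by_cases hc : PySem.Chars.isupper c
      · rw [if_pos hc, (ihs _).2]
        constructor
        · rintro (hx | ⟨d, hd, h1, h2⟩)
          · exact Or.inl hx
          · exact Or.inr ⟨d, Or.inr hd, h1, h2⟩
        · rintro (hx | ⟨d, rfl | hd, h1, h2⟩)
          · exact Or.inl hx
          · exact absurd hc (by simp [h1])
          · exact Or.inr ⟨d, hd, h1, h2⟩
      · rw [if_neg hc, (ihs _).2]
        simp only [PySem.Set.mem_add]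
        constructor
        · rintro ((hx | he) | ⟨d, hd, h1, h2⟩)
          · exact Or.inl hx
          · exact Or.inr ⟨c, Or.inl rfl, by simpa using hc, he⟩
          · exact Or.inr ⟨d, Or.inr hd, h1, h2⟩
        · rintro (hx | ⟨d, rfl | hd, h1, h2⟩)
          · exact Or.inl (Or.inl hx)
          · exact Or.inl (Or.inr h2)
          · exact Or.inr ⟨d, hd, h1, h2⟩

theorem pvSplit_nodup (s : List Char) (st : PySem.Set Char × PySem.Set Char)
    (h1 : st.1.Nodup) (h2 : st.2.Nodup) :
    (s.foldl
        (fun (st : PySem.Set Char × PySem.Set Char) c =>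
          if PySem.Chars.isupper c then (PySem.Set.add st.1 (PySem.Chars.lowerChar c), st.2)
          else (st.1, PySem.Set.add st.2 c)) st).1.Nodup ∧
    (s.foldl
        (fun (st : PySem.Set Char × PySem.Set Char) c =>
          if PySem.Chars.isupper c then (PySem.Set.add st.1 (PySem.Chars.lowerChar c), st.2)
          else (st.1, PySem.Set.add st.2 c)) st).2.Nodup := by
  induction s generalizing st with
  | nil => exact ⟨h1, h2⟩
  | cons c s ihs =>
    simp only [List.foldl_cons]
    split_ifs
    · exact ihs _ (PySem.Set.nodup_add _ _ h1) h2
    · exact ihs _ h1 (PySem.Set.nodup_add _ _ h2)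

-- the initial `for i, seq in nums.items()` loop of seven_segment
theorem pvVars0_mem (l : List (Int × PySem.Set Char)) (dig1 dig2 : PySem.Set Char)
    (st : PySem.Set Int × PySem.Set Int) (x : Int) :
    (x ∈ (l.foldl
        (fun (st : PySem.Set Int × PySem.Set Int) p =>
          let st1 := if PySem.Set.equal p.2 dig1 then PySem.Set.add st.1 p.1 else st.1
          let st2 := if PySem.Set.equal p.2 dig2 then PySem.Set.add st.2 p.1 else st.2
          (st1, st2)) st).1 ↔
      x ∈ st.1 ∨ ∃ p ∈ l, p.1 = x ∧ PySem.Set.equal p.2 dig1 = true) ∧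
    (x ∈ (l.foldl
        (fun (st : PySem.Set Int × PySem.Set Int) p =>
          let st1 := if PySem.Set.equal p.2 dig1 then PySem.Set.add st.1 p.1 else st.1
          let st2 := if PySem.Set.equal p.2 dig2 then PySem.Set.add st.2 p.1 else st.2
          (st1, st2)) st).2 ↔
      x ∈ st.2 ∨ ∃ p ∈ l, p.1 = x ∧ PySem.Set.equal p.2 dig2 = true) := by
  induction l generalizing st with
  | nil => simp
  | cons p l ihl =>
    simp only [List.foldl_cons, List.mem_cons]
    constructor
    · rw [(ihl _).1]
      by_cases hp : PySem.Set.equal p.2 dig1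
      · simp only [if_pos hp, PySem.Set.mem_add]
        constructor
        · rintro (⟨hx | rfl⟩ | ⟨q, hq, h1, h2⟩)
          · exact Or.inl hx
          · exact Or.inr ⟨p, Or.inl rfl, rfl, hp⟩
          · exact Or.inr ⟨q, Or.inr hq, h1, h2⟩
        · rintro (hx | ⟨q, rfl | hq, h1, h2⟩)
          · exact Or.inl (Or.inl hx)
          · exact Or.inl (Or.inr h1.symm)
          · exact Or.inr ⟨q, hq, h1, h2⟩
      · simp only [if_neg hp]
        constructor
        · rintro (hx | ⟨q, hq, h1, h2⟩)
          · exact Or.inl hx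
          · exact Or.inr ⟨q, Or.inr hq, h1, h2⟩
        · rintro (hx | ⟨q, rfl | hq, h1, h2⟩)
          · exact Or.inl hx
          · exact absurd h2 (by simpa using hp)
          · exact Or.inr ⟨q, hq, h1, h2⟩
    · rw [(ihl _).2]
      by_cases hp : PySem.Set.equal p.2 dig2
      · simp only [if_pos hp, PySem.Set.mem_add]
        constructor
        · rintro (⟨hx | rfl⟩ | ⟨q, hq, h1, h2⟩)
          · exact Or.inl hx
          · exact Or.inr ⟨p, Or.inl rfl, rfl, hp⟩
          · exact Or.inr ⟨q, Or.inr hq, h1, h2⟩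
        · rintro (hx | ⟨q, rfl | hq, h1, h2⟩)
          · exact Or.inl (Or.inl hx)
          · exact Or.inl (Or.inr h1.symm)
          · exact Or.inr ⟨q, hq, h1, h2⟩
      · simp only [if_neg hp]
        constructor
        · rintro (hx | ⟨q, hq, h1, h2⟩)
          · exact Or.inl hx
          · exact Or.inr ⟨q, Or.inr hq, h1, h2⟩
        · rintro (hx | ⟨q, rfl | hq, h1, h2⟩)
          · exact Or.inl hx
          · exact absurd h2 (by simpa using hp)
          · exact Or.inr ⟨q, hq, h1, h2⟩

theorem pvVars0_nodup (l : List (Int × PySem.Set Char)) (dig1 dig2 : PySem.Set Char)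
    (st : PySem.Set Int × PySem.Set Int) (h1 : st.1.Nodup) (h2 : st.2.Nodup) :
    (l.foldl
        (fun (st : PySem.Set Int × PySem.Set Int) p =>
          let st1 := if PySem.Set.equal p.2 dig1 then PySem.Set.add st.1 p.1 else st.1
          let st2 := if PySem.Set.equal p.2 dig2 then PySem.Set.add st.2 p.1 else st.2
          (st1, st2)) st).1.Nodup ∧
    (l.foldl
        (fun (st : PySem.Set Int × PySem.Set Int) p =>
          let st1 := if PySem.Set.equal p.2 dig1 then PySem.Set.add st.1 p.1 else st.1
          let st2 := if PySem.Set.equal p.2 dig2 then PySem.Set.add st.2 p.1 else st.2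
          (st1, st2)) st).2.Nodup := by
  induction l generalizing st with
  | nil => exact ⟨h1, h2⟩
  | cons p l ihl =>
    simp only [List.foldl_cons]
    apply ihl <;> split_ifs <;>
      first
        | exact PySem.Set.nodup_add _ _ h1
        | exact h1
        | exact PySem.Set.nodup_add _ _ h2
        | exact h2

-- `equal pat dig ∨ pvE broken dig pat` is exactly the containment condition pvBetween
theorem pvEqualE_iff_between (broken dig pat : List Char) :
    (PySem.Set.equal pat dig = true ∨ pvE broken dig pat) ↔ pvBetween dig broken pat := by
  constructor
  · rintro (h | ⟨h1, h2, _⟩)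
    · rw [PySem.Set.equal_iff] at h
      exact ⟨fun c hc => (h c).2 hc, fun c hc => Or.inl ((h c).1 hc)⟩
    · exact ⟨h1, h2⟩
  · rintro ⟨h1, h2⟩
    by_cases hsub : ∀ c ∈ pat, c ∈ dig
    · refine Or.inl ?_
      rw [PySem.Set.equal_iff]
      exact fun c => ⟨fun hc => hsub c hc, fun hc => h1 c hc⟩
    · push Not at hsub
      obtain ⟨c, hc, hcd⟩ := hsub
      exact Or.inr ⟨h1, h2, Or.inl ⟨c, hc, hcd⟩⟩

-- B's boolean test decides pvBetween
theorem pvCond_iff (dig broken pat : List Char) :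
    (PySem.Set.issubset dig (PySem.Set.ofList pat) &&
      PySem.Set.issubset (PySem.Set.ofList pat) (PySem.Set.union dig broken)) = true ↔
      pvBetween dig broken pat := by
  rw [Bool.and_eq_true, PySem.Set.issubset_iff, PySem.Set.issubset_iff]
  unfold pvBetween
  constructor
  · rintro ⟨h1, h2⟩
    refine ⟨fun c hc => ?_, fun c hc => ?_⟩
    · simpa [PySem.Set.mem_ofList] using h1 c hc
    · simpa [PySem.Set.mem_union, PySem.Set.mem_ofList] using
        h2 c (by simpa [PySem.Set.mem_ofList] using hc)
  · rintro ⟨h1, h2⟩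
    refine ⟨fun c hc => ?_, fun c hc => ?_⟩
    · simpa [PySem.Set.mem_ofList] using h1 c hc
    · simpa [PySem.Set.mem_union, PySem.Set.mem_ofList] using
        h2 c (by simpa [PySem.Set.mem_ofList] using hc)

-- pvBetween only depends on the MEMBERS of dig and broken
theorem pvBetween_congr (dig dig' broken broken' pat : List Char)
    (hd : ∀ c : Char, c ∈ dig ↔ c ∈ dig') (hb : ∀ c : Char, c ∈ broken ↔ c ∈ broken') :
    pvBetween dig broken pat ↔ pvBetween dig' broken' pat := by
  unfold pvBetween
  constructor
  · rintro ⟨h1, h2⟩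
    exact ⟨fun c hc => h1 c ((hd c).2 hc),
      fun c hc => (h2 c hc).imp (fun h => (hd c).1 h) (fun h => (hb c).1 h)⟩
  · rintro ⟨h1, h2⟩
    exact ⟨fun c hc => h1 c ((hd c).1 hc),
      fun c hc => (h2 c hc).imp (fun h => (hd c).2 h) (fun h => (hb c).2 h)⟩

-- a Nodup list of digits whose membership is "key of a pattern satisfying pvBetween"
-- has length pvCount
theorem pvLen_eq_count (dv : PySem.Set Int) (hnd : dv.Nodup)
    (dig broken lit' broken' : PySem.Set Char)
    (hd : ∀ c : Char, c ∈ dig ↔ c ∈ lit') (hb : ∀ c : Char, c ∈ broken ↔ c ∈ broken')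
    (hmem : ∀ x : Int, x ∈ dv ↔ ∃ p ∈ pvNums, p.1 = x ∧ pvBetween dig broken p.2) :
    PySem.Set.len dv = pvCount lit' broken' := by
  -- dv is a permutation of the keys of the filtered table
  have hperm : dv.Perm
      ((pvNUMS.filter
        (fun p => PySem.Set.issubset lit' (PySem.Set.ofList p.2) &&
          PySem.Set.issubset (PySem.Set.ofList p.2) (PySem.Set.union lit' broken'))).map (·.1)) := by
    rw [List.perm_ext_iff_of_nodup hnd]
    · intro x
      rw [hmem x]
      simp only [List.mem_map, List.mem_filter]
      constructor
      · rintro ⟨p, hp, rfl, hB⟩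
        simp only [pvNums, List.mem_map] at hp
        obtain ⟨q, hq, hqp⟩ := hp
        refine ⟨q, ⟨hq, ?_⟩, by rw [← hqp]⟩
        rw [pvCond_iff]
        rw [← pvBetween_congr dig lit' broken broken' _ hd hb]
        -- pvBetween dig broken p.2 with p.2 = ofList q.2; transfer over ofList membership
        have hpat : ∀ c : Char, c ∈ p.2 ↔ c ∈ q.2 := by
          intro c
          rw [← hqp]
          exact PySem.Set.mem_ofList ..
        obtain ⟨h1, h2⟩ := hB
        exact ⟨fun c hc => (hpat _).1 (h1 c hc), fun c hc => h2 c ((hpat _).2 hc)⟩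
      · rintro ⟨q, ⟨hq, hcond⟩, rfl⟩
        refine ⟨(q.1, PySem.Set.ofList q.2), ?_, rfl, ?_⟩
        · simp only [pvNums, List.mem_map]
          exact ⟨q, hq, rfl⟩
        rw [pvCond_iff] at hcond
        rw [← pvBetween_congr dig lit' broken broken' _ hd hb] at hcond
        obtain ⟨h1, h2⟩ := hcond
        exact ⟨fun c hc => (PySem.Set.mem_ofList ..).2 (h1 c hc),
          fun c hc => h2 c ((PySem.Set.mem_ofList ..).1 hc)⟩
    · have hsub : ((pvNUMS.filter
          (fun p => PySem.Set.issubset lit' (PySem.Set.ofList p.2) &&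
            PySem.Set.issubset (PySem.Set.ofList p.2) (PySem.Set.union lit' broken'))).map
            (·.1)).Sublist (pvNUMS.map (·.1)) :=
        List.Sublist.map _ List.filter_sublist
      have hkeys : (pvNUMS.map (·.1)).Nodup := by decide
      exact List.Nodup.sublist hsub hkeys
  unfold pvCount PySem.Set.len
  rw [hperm.length_eq]
  simp [List.countP_eq_length_filter, List.filter_map, Function.comp_def]

-- ===== VERDICT (by name: the statement is the Claim_ definition above) =====
theorem seven_segment_spec : Claim_equal_seven_segment := by
  intro lit_seg broken_seg _
  unfold Spec_seven_segment seven_segment seven_segment_alt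
  simp only []
  -- name the four A-side sets
  set digs := lit_seg.toList.foldl
    (fun (st : PySem.Set Char × PySem.Set Char) segment =>
      if PySem.Chars.isupper segment then (PySem.Set.add st.1 (PySem.Chars.lowerChar segment), st.2)
      else (st.1, PySem.Set.add st.2 segment))
    (PySem.Set.empty, PySem.Set.empty) with hdigs
  set brs := broken_seg.toList.foldl
    (fun (st : PySem.Set Char × PySem.Set Char) i =>
      if PySem.Chars.isupper i then (PySem.Set.add st.1 (PySem.Chars.lowerChar i), st.2)
      else (st.1, PySem.Set.add st.2 i))
    (PySem.Set.empty, PySem.Set.empty) with hbrs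
  have hdigs_nodup := pvSplit_nodup lit_seg.toList (PySem.Set.empty, PySem.Set.empty)
    List.nodup_nil List.nodup_nil
  have hbrs_nodup := pvSplit_nodup broken_seg.toList (PySem.Set.empty, PySem.Set.empty)
    List.nodup_nil List.nodup_nil
  rw [← hdigs] at hdigs_nodup
  rw [← hbrs] at hbrs_nodup
  have hv0 := pvVars0_nodup pvNums digs.1 digs.2 (PySem.Set.empty, PySem.Set.empty)
    List.nodup_nil List.nodup_nil
  -- first factor
  have h1 : PySem.Set.len
      (pvCombinations brs.1.length brs.1 PySem.Set.empty digs.1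
        (pvNums.foldl
          (fun (st : PySem.Set Int × PySem.Set Int) p =>
            let st1 := if PySem.Set.equal p.2 digs.1 then PySem.Set.add st.1 p.1 else st.1
            let st2 := if PySem.Set.equal p.2 digs.2 then PySem.Set.add st.2 p.1 else st.2
            (st1, st2))
          (PySem.Set.empty, PySem.Set.empty)).1).2 =
      pvCount (PySem.Set.ofList
          ((lit_seg.toList.filter (fun c => PySem.Chars.isupper c)).map PySem.Chars.lowerChar))
        (PySem.Set.ofList
          ((broken_seg.toList.filter (fun c => PySem.Chars.isupper c)).map PySem.Chars.lowerChar)) := by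
    refine pvLen_eq_count _ ?_ digs.1 brs.1 _ _ ?_ ?_ ?_
    · exact pvCombinations_nodup _ _ _ _ _ hv0.1
    · intro c
      rw [hdigs, (pvSplit_mem lit_seg.toList (PySem.Set.empty, PySem.Set.empty) c).1]
      simp [PySem.Set.mem_ofList, List.mem_map, List.mem_filter, PySem.Set.empty]
      tauto
    · intro c
      rw [hbrs, (pvSplit_mem broken_seg.toList (PySem.Set.empty, PySem.Set.empty) c).1]
      simp [PySem.Set.mem_ofList, List.mem_map, List.mem_filter, PySem.Set.empty]
      tauto
    · intro x
      rw [pvCombinations_mem brs.1.length brs.1 hbrs_nodup.1 le_rfl]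
      rw [(pvVars0_mem pvNums digs.1 digs.2 _ x).1]
      simp only [List.not_mem_nil, false_or, PySem.Set.empty]
      constructor
      · rintro (⟨p, hp, h1, h2⟩ | ⟨p, hp, h1, h2⟩)
        · exact ⟨p, hp, h1, (pvEqualE_iff_between brs.1 digs.1 p.2).1 (Or.inl h2)⟩
        · exact ⟨p, hp, h1, (pvEqualE_iff_between brs.1 digs.1 p.2).1 (Or.inr h2)⟩
      · rintro ⟨p, hp, h1, h2⟩
        rcases (pvEqualE_iff_between brs.1 digs.1 p.2).2 h2 with h | h
        · exact Or.inl ⟨p, hp, h1, h⟩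
        · exact Or.inr ⟨p, hp, h1, h⟩
  -- second factor
  have h2 : PySem.Set.len
      (pvCombinations brs.2.length brs.2 PySem.Set.empty digs.2
        (pvNums.foldl
          (fun (st : PySem.Set Int × PySem.Set Int) p =>
            let st1 := if PySem.Set.equal p.2 digs.1 then PySem.Set.add st.1 p.1 else st.1
            let st2 := if PySem.Set.equal p.2 digs.2 then PySem.Set.add st.2 p.1 else st.2
            (st1, st2))
          (PySem.Set.empty, PySem.Set.empty)).2).2 =
      pvCount (PySem.Set.ofList (lit_seg.toList.filter (fun c => !PySem.Chars.isupper c)))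
        (PySem.Set.ofList (broken_seg.toList.filter (fun c => !PySem.Chars.isupper c))) := by
    refine pvLen_eq_count _ ?_ digs.2 brs.2 _ _ ?_ ?_ ?_
    · exact pvCombinations_nodup _ _ _ _ _ hv0.2
    · intro c
      rw [hdigs, (pvSplit_mem lit_seg.toList (PySem.Set.empty, PySem.Set.empty) c).2]
      simp [PySem.Set.mem_ofList, List.mem_filter, PySem.Set.empty]
    · intro c
      rw [hbrs, (pvSplit_mem broken_seg.toList (PySem.Set.empty, PySem.Set.empty) c).2]
      simp [PySem.Set.mem_ofList, List.mem_filter, PySem.Set.empty]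
    · intro x
      rw [pvCombinations_mem brs.2.length brs.2 hbrs_nodup.2 le_rfl]
      rw [(pvVars0_mem pvNums digs.1 digs.2 _ x).2]
      simp only [List.not_mem_nil, false_or, PySem.Set.empty]
      constructor
      · rintro (⟨p, hp, h1', h2'⟩ | ⟨p, hp, h1', h2'⟩)
        · exact ⟨p, hp, h1', (pvEqualE_iff_between brs.2 digs.2 p.2).1 (Or.inl h2')⟩
        · exact ⟨p, hp, h1', (pvEqualE_iff_between brs.2 digs.2 p.2).1 (Or.inr h2')⟩
      · rintro ⟨p, hp, h1', h2'⟩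
        rcases (pvEqualE_iff_between brs.2 digs.2 p.2).2 h2' with h | h
        · exact Or.inl ⟨p, hp, h1', h⟩
        · exact Or.inr ⟨p, hp, h1', h⟩
  rw [h1, h2]
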